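-- pv_equiv track=rewrite | github.com/bigrewal/code-sense | app/retriever_four.py | order_files_from_zones
-- ===== SOURCE A (Python) =====
-- from typing import List, Dict, Set, Tuple, Optional, Any
--
-- def is_packaging(path: str) -> bool:
--     base = (path or "").rsplit("/", 1)[-1].lower()
--     return base in {"setup.py", "pyproject.toml", "poetry.lock", "requirements.txt"}
--
-- def order_files_from_zones(zones: Dict[str, Set[str]]) -> List[Dict[str, str]]:
--     ordered: List[Dict[str, str]] = []
--     seen: Set[str] = set()
--
--     def flush(group: Set[str]):
--         for fp in sorted(group):
--             if fp and fp not in seen: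
--                 seen.add(fp)
--                 ordered.append({"file_path": fp})
--
--     # Priority zones
--     flush(zones.get("entrypoints", set()))
--     flush(zones.get("defs", set()))
--     flush({fp for fp in zones.get("upstream", set()) if not is_packaging(fp)})
--     flush({fp for fp in zones.get("downstream", set()) if not is_packaging(fp)})
--
--     # Packaging/closure last
--     closure = set()
--     for k in ("closure", "upstream", "downstream"):
--         closure |= {fp for fp in zones.get(k, set()) if is_packaging(fp)}
--     flush(closure)
--     return ordered
-- ===== SOURCE B (Python) =====
-- def is_packaging(path: str) -> bool:
--     base = (path or "").rsplit("/", 1)[-1].lower()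
--     return base in {"setup.py", "pyproject.toml", "poetry.lock", "requirements.txt"}
--
-- def order_files_from_zones(zones):
--     # Minimal priority rank per path: 0 entrypoints, 1 defs, 2 upstream (non-packaging),
--     # 3 downstream (non-packaging), 4 packaging files from closure/upstream/downstream.
--     best = {}
--     def note(fp, r):
--         if fp and (fp not in best or r < best[fp]):
--             best[fp] = r
--     for fp in zones.get("entrypoints", set()):
--         note(fp, 0)
--     for fp in zones.get("defs", set()):
--         note(fp, 1)
--     for fp in zones.get("upstream", set()):
--         note(fp, 4 if is_packaging(fp) else 2)
--     for fp in zones.get("downstream", set()):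
--         note(fp, 4 if is_packaging(fp) else 3)
--     for fp in zones.get("closure", set()):
--         if is_packaging(fp):
--             note(fp, 4)
--     return [{"file_path": fp}
--             for fp, r in sorted(best.items(), key=lambda kv: (kv[1], kv[0]))]
-- ===== Notes on version B (the rewrite author's own statement) =====
-- stated objective: alternative
-- what changed: Instead of flushing five sorted groups through a mutating seen-set, B computes each path's minimal priority rank (0-4) in a single dict pass over the zones and emits one global sort of the dict items by (rank, path), which reproduces A's zone-block order because A's output is exactly the paths ordered by (first zone that accepts them, path).
import Mathlib
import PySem

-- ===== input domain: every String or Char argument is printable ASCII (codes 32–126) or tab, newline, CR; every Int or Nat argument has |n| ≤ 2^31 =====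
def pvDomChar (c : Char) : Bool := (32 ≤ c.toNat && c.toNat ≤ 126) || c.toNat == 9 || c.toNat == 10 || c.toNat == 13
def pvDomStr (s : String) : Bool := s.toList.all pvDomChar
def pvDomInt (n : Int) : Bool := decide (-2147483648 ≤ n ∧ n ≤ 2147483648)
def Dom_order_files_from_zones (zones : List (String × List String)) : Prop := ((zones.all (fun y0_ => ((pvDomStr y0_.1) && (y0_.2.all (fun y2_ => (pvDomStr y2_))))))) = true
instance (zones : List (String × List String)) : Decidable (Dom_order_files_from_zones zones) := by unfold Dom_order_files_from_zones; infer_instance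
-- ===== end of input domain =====

-- B replaces A's staged flush-with-seen-set by computing each path's minimal priority rank in one
-- dict pass and emitting a single global sort by (rank, path) (alternative algorithm; no speed claim).

-- ===== PORT A =====
-- is_packaging: rsplit("/",1)[-1] is the suffix after the last '/' (exact: maxsplit=1 splits at the last separator)
def pvIsPackaging (path : String) : Bool :=
  let base := PySem.Chars.lower ((path.toList.reverse.takeWhile (fun c => c ≠ '/')).reverse)
  base == "setup.py".toList || base == "pyproject.toml".toList ||
    base == "poetry.lock".toList || base == "requirements.txt".toList

-- A's nested 'flush' closure: iterate sorted(group), mutating (ordered, seen)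
def pvFlush (st : List (List (String × String)) × PySem.Set String) (group : List String) :
    List (List (String × String)) × PySem.Set String :=
  (PySem.List.sorted group (fun x => x) false).foldl
    (fun st fp =>
      if fp != "" && !(PySem.Set.contains st.2 fp) then
        (st.1 ++ [[("file_path", fp)]], PySem.Set.add st.2 fp)
      else st) st

def order_files_from_zones (zones : List (String × List String)) : List (List (String × String)) :=
  let st1 := pvFlush ([], PySem.Set.empty) (PySem.Dict.getD (PySem.Dict.mk zones) "entrypoints" [])
  let st2 := pvFlush st1 (PySem.Dict.getD (PySem.Dict.mk zones) "defs" [])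
  let st3 := pvFlush st2 (PySem.Set.ofList ((PySem.Dict.getD (PySem.Dict.mk zones) "upstream" []).filter (fun fp => !pvIsPackaging fp)))
  let st4 := pvFlush st3 (PySem.Set.ofList ((PySem.Dict.getD (PySem.Dict.mk zones) "downstream" []).filter (fun fp => !pvIsPackaging fp)))
  let closure := (["closure", "upstream", "downstream"]).foldl
    (fun c k => PySem.Set.union c (PySem.Set.ofList ((PySem.Dict.getD (PySem.Dict.mk zones) k []).filter (fun fp => pvIsPackaging fp)))) PySem.Set.empty
  let st5 := pvFlush st4 closure
  st5.1

-- ===== PORT B =====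
-- B's 'note' helper: record rank r for fp if fp is non-empty and r improves on the stored rank.
-- (Python 'fp not in best or r < best[fp]': best[fp] exists when contains, so getD is exact.)
def pvNote (best : PySem.Dict String Int) (fp : String) (r : Int) : PySem.Dict String Int :=
  if fp != "" && (!(PySem.Dict.contains best fp) || r < PySem.Dict.getD best fp 0) then
    PySem.Dict.insert best fp r
  else best

-- B: one dict pass assigning each path its minimal rank, then one sort by (rank, path).
-- (Python iterates each zone set in hash order; the best dict's lookups and the final
-- sorted(items, key=(rank, path)) with all-distinct keys are independent of that order.)
def order_files_from_zones_alt (zones : List (String × List String)) : List (List (String × String)) :=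
  let b1 := (PySem.Dict.getD (PySem.Dict.mk zones) "entrypoints" []).foldl (fun d fp => pvNote d fp 0) PySem.Dict.empty
  let b2 := (PySem.Dict.getD (PySem.Dict.mk zones) "defs" []).foldl (fun d fp => pvNote d fp 1) b1
  let b3 := (PySem.Dict.getD (PySem.Dict.mk zones) "upstream" []).foldl (fun d fp => pvNote d fp (if pvIsPackaging fp then 4 else 2)) b2
  let b4 := (PySem.Dict.getD (PySem.Dict.mk zones) "downstream" []).foldl (fun d fp => pvNote d fp (if pvIsPackaging fp then 4 else 3)) b3
  let b5 := (PySem.Dict.getD (PySem.Dict.mk zones) "closure" []).foldl (fun d fp => if pvIsPackaging fp then pvNote d fp 4 else d) b4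
  (PySem.List.sorted2 b5.items (fun kv => kv.2) (fun kv => kv.1) false).map (fun kv => [(("file_path" : String), kv.1)])

-- ===== PRECONDITION & SPEC =====
def Spec_order_files_from_zones (zones : List (String × List String)) (out : List (List (String × String))) : Prop := out = order_files_from_zones_alt zones
instance (zones : List (String × List String)) (out : List (List (String × String))) : Decidable (Spec_order_files_from_zones zones out) := by unfold Spec_order_files_from_zones; infer_instance

-- ===== CLAIM (what is proved, stated in full; the proofs are below) =====
def Claim_equal_order_files_from_zones : Prop := ∀ (zones : List (String × List String)), Dom_order_files_from_zones zones → Spec_order_files_from_zones zones (order_files_from_zones zones)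

-- ===== LEMMAS AND PROOFS =====

-- pvNewOf seen l: the elements A's flush loop emits from l starting at seen (non-empty, unseen, first occurrence)
def pvNewOf (seen : List String) : List String → List String
  | [] => []
  | fp :: t => if fp ≠ "" ∧ fp ∉ seen then fp :: pvNewOf (seen ++ [fp]) t else pvNewOf seen t

theorem pv_flushFold (l : List String) (ord : List (List (String × String))) (seen : List String) :
    l.foldl
      (fun st fp =>
        if fp != "" && !(PySem.Set.contains st.2 fp) then
          (st.1 ++ [[("file_path", fp)]], PySem.Set.add st.2 fp)
        else st) (ord, seen)
    = (ord ++ (pvNewOf seen l).map (fun fp => [(("file_path" : String), fp)]), seen ++ pvNewOf seen l) := by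
  induction l generalizing ord seen with
  | nil => simp [pvNewOf]
  | cons fp t ih =>
    simp only [List.foldl_cons]
    by_cases h : fp ≠ "" ∧ fp ∉ seen
    · have hc : (fp != "" && !(PySem.Set.contains seen fp)) = true := by
        simp [h.1, h.2]
      have hadd : PySem.Set.add seen fp = seen ++ [fp] := by
        simp [PySem.Set.add, h.2]
      simp only [hc, if_true, hadd]
      rw [ih]
      simp [pvNewOf, h, List.append_assoc]
    · have hc : (fp != "" && !(PySem.Set.contains seen fp)) = false := by
        by_cases he : fp = "" <;> simp_all
      simp only [hc, Bool.false_eq_true, if_false]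
      rw [ih]
      simp [pvNewOf, h]

theorem pv_flush_spec (g : List String) (ord : List (List (String × String))) (seen : List String) :
    pvFlush (ord, seen) g
    = (ord ++ (pvNewOf seen (PySem.List.sorted g (fun x => x) false)).map (fun fp => [(("file_path" : String), fp)]),
       seen ++ pvNewOf seen (PySem.List.sorted g (fun x => x) false)) := by
  unfold pvFlush
  exact pv_flushFold _ _ _

theorem pv_newOf_mem (l : List String) (seen : List String) (x : String) :
    x ∈ pvNewOf seen l ↔ x ∈ l ∧ x ≠ "" ∧ x ∉ seen := by
  induction l generalizing seen with
  | nil => simp [pvNewOf]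
  | cons fp t ih =>
    by_cases h : fp ≠ "" ∧ fp ∉ seen
    · rw [pvNewOf, if_pos h]
      simp only [List.mem_cons, ih, List.mem_append]
      by_cases hxf : x = fp
      · subst hxf; simp [h.1, h.2]
      · simp [hxf]
    · rw [pvNewOf, if_neg h]
      rw [ih]
      simp only [List.mem_cons]
      by_cases hxf : x = fp
      · subst hxf
        constructor
        · rintro ⟨_, hx, hs⟩; exact ⟨Or.inr ‹_›, hx, hs⟩
        · rintro ⟨_, hx, hs⟩; exact absurd ⟨hx, hs⟩ h
      · simp [hxf]

theorem pv_newOf_sublist (l : List String) (seen : List String) : (pvNewOf seen l).Sublist l := by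
  induction l generalizing seen with
  | nil => simp [pvNewOf]
  | cons fp t ih =>
    by_cases h : fp ≠ "" ∧ fp ∉ seen
    · rw [pvNewOf, if_pos h]; exact (ih _).cons₂ fp
    · rw [pvNewOf, if_neg h]; exact (ih _).cons fp

theorem pv_newOf_nodup (l : List String) (seen : List String) : (pvNewOf seen l).Nodup := by
  induction l generalizing seen with
  | nil => simp [pvNewOf]
  | cons fp t ih =>
    by_cases h : fp ≠ "" ∧ fp ∉ seen
    · rw [pvNewOf, if_pos h]
      refine List.nodup_cons.mpr ⟨?_, ih _⟩
      intro hmem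
      rcases (pv_newOf_mem _ _ _).mp hmem with ⟨_, _, hs⟩
      simp at hs
    · rw [pvNewOf, if_neg h]; exact ih _

theorem pv_newOf_pairwise_lt (l : List String) (seen : List String)
    (h : l.Pairwise (· ≤ ·)) : (pvNewOf seen l).Pairwise (· < ·) := by
  have hle : (pvNewOf seen l).Pairwise (· ≤ ·) := h.sublist (pv_newOf_sublist l seen)
  have hne : (pvNewOf seen l).Pairwise (· ≠ ·) := pv_newOf_nodup l seen
  exact (hle.and hne).imp (fun hab => lt_of_le_of_ne hab.1 hab.2)

theorem pvNote_get_ne (d : PySem.Dict String Int) (x fp : String) (r : Int) (h : fp ≠ x) :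
    (pvNote d x r).get? fp = d.get? fp := by
  unfold pvNote
  split
  · rw [PySem.Dict.get?_insert]; simp [h]
  · rfl

theorem pv_note_get (l : List String) (rk : String → Int) (d : PySem.Dict String Int) (fp : String) :
    (l.foldl (fun d x => pvNote d x (rk x)) d).get? fp =
      if fp ∈ l ∧ fp ≠ "" then
        some (match d.get? fp with | none => rk fp | some v => min v (rk fp))
      else d.get? fp := by
  induction l generalizing d with
  | nil => simp
  | cons x t ih =>
    simp only [List.foldl_cons]
    rw [ih]
    by_cases hx : fp = x
    · subst hx
      by_cases hemp : fp = ""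
      · subst hemp
        have : pvNote d "" (rk "") = d := by simp [pvNote]
        simp [this]
      · cases hc : d.get? fp with
        | none =>
          have hn : pvNote d fp (rk fp) = d.insert fp (rk fp) := by
            simp [pvNote, PySem.Dict.contains_eq_isSome_get?, hc, hemp]
          rw [hn]
          have hg : (d.insert fp (rk fp)).get? fp = some (rk fp) := PySem.Dict.get?_insert_self _ _ _
          simp [hg, hc, hemp, min_self]
        | some v =>
          by_cases hlt : rk fp < v
          · have hn : pvNote d fp (rk fp) = d.insert fp (rk fp) := by
              simp [pvNote, PySem.Dict.contains_eq_isSome_get?, PySem.Dict.getD_eq_get?_getD, hc, hemp, hlt]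
            rw [hn]
            have hg : (d.insert fp (rk fp)).get? fp = some (rk fp) := PySem.Dict.get?_insert_self _ _ _
            have hm : min v (rk fp) = rk fp := min_eq_right hlt.le
            simp [hg, hc, hemp, hm, min_self]
          · have hn : pvNote d fp (rk fp) = d := by
              simp [pvNote, PySem.Dict.contains_eq_isSome_get?, PySem.Dict.getD_eq_get?_getD, hc, hemp, hlt]
            have hm : min v (rk fp) = v := min_eq_left (not_lt.mp hlt)
            simp [hn, hc, hemp, hm]
    · rw [pvNote_get_ne d x fp (rk x) hx]
      simp [List.mem_cons, hx]

theorem pv_note_nodup (l : List String) (rk : String → Int) (d : PySem.Dict String Int)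
    (h : d.keys.Nodup) : (l.foldl (fun d x => pvNote d x (rk x)) d).keys.Nodup := by
  induction l generalizing d with
  | nil => exact h
  | cons x t ih =>
    simp only [List.foldl_cons]
    apply ih
    unfold pvNote
    split
    · exact PySem.Dict.nodup_keys_insert _ _ _ h
    · exact h

theorem pv_insertBy_pairwise {α : Type} (before : α → α → Bool) (R : α → α → Prop)
    (hT : ∀ a b c, R a b → R b c → R a c) (h1 : ∀ a b, before a b = true → R a b)
    (h2 : ∀ a b, before a b = false → R b a)
    (x : α) (l : List α) (hl : l.Pairwise R) :
    (PySem.List.insertBy before x l).Pairwise R := by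
  induction l with
  | nil => simp [PySem.List.insertBy]
  | cons y ys ih =>
    rcases List.pairwise_cons.mp hl with ⟨hy, hys⟩
    have heq : PySem.List.insertBy before x (y :: ys)
        = if before x y = true then x :: y :: ys else y :: PySem.List.insertBy before x ys := rfl
    rw [heq]
    by_cases hb : before x y = true
    · rw [if_pos hb]
      refine List.pairwise_cons.mpr ⟨?_, hl⟩
      intro z hz
      rcases List.mem_cons.mp hz with rfl | hz
      · exact h1 _ _ hb
      · exact hT _ _ _ (h1 _ _ hb) (hy z hz)
    · rw [if_neg hb]
      refine List.pairwise_cons.mpr ⟨?_, ih hys⟩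
      intro z hz
      rcases (PySem.List.mem_insertBy before x z ys).mp hz with rfl | hz
      · exact h2 _ _ (Bool.not_eq_true _ ▸ hb)
      · exact hy z hz

theorem pv_foldl_insertBy_pairwise {α : Type} (before : α → α → Bool) (R : α → α → Prop)
    (hT : ∀ a b c, R a b → R b c → R a c) (h1 : ∀ a b, before a b = true → R a b)
    (h2 : ∀ a b, before a b = false → R b a)
    (xs : List α) (init : List α) (hinit : init.Pairwise R) :
    (xs.foldl (fun acc x => PySem.List.insertBy before x acc) init).Pairwise R := by
  induction xs generalizing init with
  | nil => exact hinit
  | cons x t ih =>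
    exact ih _ (pv_insertBy_pairwise before R hT h1 h2 x init hinit)

theorem pv_sorted2_pairwise {α κ₁ κ₂ : Type} [LinearOrder κ₁] [LinearOrder κ₂]
    (xs : List α) (k1 : α → κ₁) (k2 : α → κ₂) :
    (PySem.List.sorted2 xs k1 k2 false).Pairwise
      (fun a b => k1 a < k1 b ∨ (k1 a = k1 b ∧ k2 a ≤ k2 b)) := by
  have heq : PySem.List.sorted2 xs k1 k2 false
      = xs.foldl (fun acc x => PySem.List.insertBy
          (fun a b => decide (k1 a < k1 b) || (!decide (k1 b < k1 a) && decide (k2 a < k2 b))) x acc) [] := rfl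
  rw [heq]
  apply pv_foldl_insertBy_pairwise
  · intro a b c hab hbc
    rcases hab with h | ⟨he, h⟩ <;> rcases hbc with h' | ⟨he', h'⟩
    · exact Or.inl (lt_trans h h')
    · exact Or.inl (he' ▸ h)
    · exact Or.inl (he ▸ h')
    · exact Or.inr ⟨he.trans he', le_trans h h'⟩
  · intro a b hb
    simp only [Bool.or_eq_true, Bool.and_eq_true, Bool.not_eq_eq_eq_not, Bool.not_true,
      decide_eq_true_eq, decide_eq_false_iff_not] at hb
    rcases hb with h | ⟨h, h'⟩
    · exact Or.inl h
    · rcases lt_or_eq_of_le (not_lt.mp h) with hlt | heq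
      · exact Or.inl hlt
      · exact Or.inr ⟨heq, h'.le⟩
  · intro a b hb
    simp only [Bool.or_eq_false_iff, Bool.and_eq_false_iff, Bool.not_eq_eq_eq_not, Bool.not_false,
      decide_eq_false_iff_not, decide_eq_true_eq] at hb
    rcases hb with ⟨h, h'⟩
    rcases lt_or_eq_of_le (not_lt.mp h) with hlt | heq
    · exact Or.inl hlt
    · rcases h' with h'' | h''
      · exact Or.inl h''
      · exact Or.inr ⟨heq, not_lt.mp h''⟩
  · exact List.Pairwise.nil

theorem pv_eq_of_perm {α : Type} (Rle Rlt : α → α → Prop)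
    (hcontra : ∀ a b, Rlt a b → Rle b a → False) :
    ∀ (l₁ l₂ : List α), l₁.Perm l₂ → l₁.Pairwise Rle → l₂.Pairwise Rlt → l₁ = l₂ := by
  intro l₁
  induction l₁ with
  | nil => intro l₂ h _ _; exact (List.Perm.nil_eq h).symm ▸ rfl
  | cons a t₁ ih =>
    intro l₂ h h₁ h₂
    cases l₂ with
    | nil => exact absurd h.eq_nil (List.cons_ne_nil a t₁)
    | cons b t₂ =>
      rcases List.pairwise_cons.mp h₁ with ⟨ha, ht₁⟩
      rcases List.pairwise_cons.mp h₂ with ⟨hb, ht₂⟩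
      by_cases hab : a = b
      · subst hab
        exact congrArg (List.cons a) (ih t₂ h.cons_inv ht₁ ht₂)
      · exfalso
        have haIn : a ∈ t₂ := by
          have := h.subset (List.mem_cons_self)
          rcases List.mem_cons.mp this with rfl | h'
          · exact absurd rfl hab
          · exact h'
        have hbIn : b ∈ t₁ := by
          have := h.symm.subset (List.mem_cons_self)
          rcases List.mem_cons.mp this with h' | h'
          · exact absurd h'.symm hab
          · exact h'
        exact hcontra b a (hb a haIn) (ha b hbIn)

theorem pv_sorted2_eq {α κ₁ κ₂ : Type} [LinearOrder κ₁] [LinearOrder κ₂]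
    (xs ys : List α) (k1 : α → κ₁) (k2 : α → κ₂)
    (hperm : ys.Perm xs)
    (hsort : ys.Pairwise (fun a b => k1 a < k1 b ∨ (k1 a = k1 b ∧ k2 a < k2 b))) :
    PySem.List.sorted2 xs k1 k2 false = ys := by
  apply pv_eq_of_perm (fun a b => k1 a < k1 b ∨ (k1 a = k1 b ∧ k2 a ≤ k2 b))
      (fun a b => k1 a < k1 b ∨ (k1 a = k1 b ∧ k2 a < k2 b))
  · intro a b hlt hle
    rcases hlt with h | ⟨he, h⟩ <;> rcases hle with h' | ⟨he', h'⟩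
    · exact absurd h' (lt_asymm h)
    · exact absurd (he' ▸ h) (lt_irrefl _)
    · exact absurd (he ▸ h') (lt_irrefl _)
    · exact absurd h (not_lt.mpr h')
  · exact (PySem.List.sorted2_perm xs k1 k2 false).trans hperm.symm
  · exact pv_sorted2_pairwise xs k1 k2
  · exact hsort

-- layered closed form of B's dict lookups (each zone pass keeps the minimum rank; later ranks never undercut earlier zones except packaging 4 vs downstream 3, which cannot collide since the rank is a function of the path)
theorem pv_get1 (E : List String) (fp : String) :
    (E.foldl (fun d fp => pvNote d fp 0) PySem.Dict.empty).get? fp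
    = if fp ≠ "" ∧ fp ∈ E then some 0 else none := by
  rw [pv_note_get]
  rw [PySem.Dict.get?_empty]
  split_ifs with h1 h2 <;> simp_all

theorem pv_get2 (E D : List String) (fp : String) :
    (D.foldl (fun d fp => pvNote d fp 1)
      (E.foldl (fun d fp => pvNote d fp 0) PySem.Dict.empty)).get? fp
    = if fp ≠ "" ∧ fp ∈ E then some 0 else if fp ≠ "" ∧ fp ∈ D then some 1 else none := by
  rw [pv_note_get, pv_get1]
  split_ifs <;> simp_all

theorem pv_get3 (E D U : List String) (fp : String) :
    (U.foldl (fun d fp => pvNote d fp (if pvIsPackaging fp = true then 4 else 2))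
      (D.foldl (fun d fp => pvNote d fp 1)
      (E.foldl (fun d fp => pvNote d fp 0) PySem.Dict.empty))).get? fp
    = if fp ≠ "" ∧ fp ∈ E then some 0 else if fp ≠ "" ∧ fp ∈ D then some 1
      else if fp ≠ "" ∧ fp ∈ U ∧ pvIsPackaging fp = false then some 2
      else if fp ≠ "" ∧ fp ∈ U ∧ pvIsPackaging fp = true then some 4 else none := by
  rw [pv_note_get, pv_get2]
  by_cases hP : pvIsPackaging fp = true <;>
    split_ifs <;> simp_all

theorem pv_get4 (E D U W : List String) (fp : String) :
    (W.foldl (fun d fp => pvNote d fp (if pvIsPackaging fp = true then 4 else 3))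
      (U.foldl (fun d fp => pvNote d fp (if pvIsPackaging fp = true then 4 else 2))
      (D.foldl (fun d fp => pvNote d fp 1)
      (E.foldl (fun d fp => pvNote d fp 0) PySem.Dict.empty)))).get? fp
    = if fp ≠ "" ∧ fp ∈ E then some 0 else if fp ≠ "" ∧ fp ∈ D then some 1
      else if fp ≠ "" ∧ fp ∈ U ∧ pvIsPackaging fp = false then some 2
      else if fp ≠ "" ∧ fp ∈ W ∧ pvIsPackaging fp = false then some 3
      else if fp ≠ "" ∧ (fp ∈ U ∨ fp ∈ W) ∧ pvIsPackaging fp = true then some 4 else none := by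
  rw [pv_note_get, pv_get3]
  by_cases hP : pvIsPackaging fp = true <;>
    split_ifs <;> simp_all

theorem pv_get5 (E D U W C : List String) (fp : String) :
    ((C.filter (fun fp => pvIsPackaging fp)).foldl (fun d fp => pvNote d fp 4)
      (W.foldl (fun d fp => pvNote d fp (if pvIsPackaging fp = true then 4 else 3))
      (U.foldl (fun d fp => pvNote d fp (if pvIsPackaging fp = true then 4 else 2))
      (D.foldl (fun d fp => pvNote d fp 1)
      (E.foldl (fun d fp => pvNote d fp 0) PySem.Dict.empty))))).get? fp
    = if fp ≠ "" ∧ fp ∈ E then some 0 else if fp ≠ "" ∧ fp ∈ D then some 1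
      else if fp ≠ "" ∧ fp ∈ U ∧ pvIsPackaging fp = false then some 2
      else if fp ≠ "" ∧ fp ∈ W ∧ pvIsPackaging fp = false then some 3
      else if fp ≠ "" ∧ (fp ∈ C ∨ fp ∈ U ∨ fp ∈ W) ∧ pvIsPackaging fp = true then some 4 else none := by
  rw [pv_note_get, pv_get4]
  by_cases hP : pvIsPackaging fp = true <;>
    split_ifs <;> simp_all [List.mem_filter]

-- the core equality over the five zone lists
theorem pv_core (E D U W C : List String) :
    (pvFlush (pvFlush (pvFlush (pvFlush (pvFlush ([], PySem.Set.empty) E) D)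
        (PySem.Set.ofList (U.filter (fun fp => !pvIsPackaging fp))))
        (PySem.Set.ofList (W.filter (fun fp => !pvIsPackaging fp))))
      (PySem.Set.union (PySem.Set.union (PySem.Set.union PySem.Set.empty
        (PySem.Set.ofList (C.filter (fun fp => pvIsPackaging fp))))
        (PySem.Set.ofList (U.filter (fun fp => pvIsPackaging fp))))
        (PySem.Set.ofList (W.filter (fun fp => pvIsPackaging fp))))).1
    = (PySem.List.sorted2
        ((C.foldl (fun d fp => if pvIsPackaging fp then pvNote d fp 4 else d)
          (W.foldl (fun d fp => pvNote d fp (if pvIsPackaging fp then 4 else 3))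
          (U.foldl (fun d fp => pvNote d fp (if pvIsPackaging fp then 4 else 2))
          (D.foldl (fun d fp => pvNote d fp 1)
          (E.foldl (fun d fp => pvNote d fp 0) PySem.Dict.empty))))).items)
        (fun kv => kv.2) (fun kv => kv.1) false).map (fun kv => [(("file_path" : String), kv.1)]) := by
  rw [pv_flush_spec, pv_flush_spec, pv_flush_spec, pv_flush_spec, pv_flush_spec]
  simp only [PySem.Set.empty, List.nil_append, List.append_assoc]
  rw [PySem.List.foldl_if_eq_foldl_filter]
  set N0 := pvNewOf [] (PySem.List.sorted E (fun x => x) false) with hN0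
  set N1 := pvNewOf N0 (PySem.List.sorted D (fun x => x) false) with hN1
  set N2 := pvNewOf (N0 ++ N1) (PySem.List.sorted (PySem.Set.ofList (List.filter (fun fp => !pvIsPackaging fp) U)) (fun x => x) false) with hN2
  set N3 := pvNewOf (N0 ++ (N1 ++ N2)) (PySem.List.sorted (PySem.Set.ofList (List.filter (fun fp => !pvIsPackaging fp) W)) (fun x => x) false) with hN3
  set N4 := pvNewOf (N0 ++ (N1 ++ (N2 ++ N3)))
      (PySem.List.sorted (((PySem.Set.union [] (PySem.Set.ofList (List.filter (fun fp => pvIsPackaging fp) C))).union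
        (PySem.Set.ofList (List.filter (fun fp => pvIsPackaging fp) U))).union
        (PySem.Set.ofList (List.filter (fun fp => pvIsPackaging fp) W))) (fun x => x) false) with hN4
  set b5 := (List.filter (fun fp => pvIsPackaging fp) C).foldl (fun d fp => pvNote d fp 4)
          (W.foldl (fun d fp => pvNote d fp (if pvIsPackaging fp = true then 4 else 3))
          (U.foldl (fun d fp => pvNote d fp (if pvIsPackaging fp = true then 4 else 2))
          (D.foldl (fun d fp => pvNote d fp 1)
          (E.foldl (fun d fp => pvNote d fp 0) PySem.Dict.empty)))) with hb5
  -- membership characterizations of the five emitted blocks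
  have hmem0 : ∀ x : String, x ∈ N0 ↔ x ∈ E ∧ x ≠ "" := by
    intro x
    rw [hN0, pv_newOf_mem, PySem.List.mem_sorted]
    simp
  have hmem1 : ∀ x : String, x ∈ N1 ↔ x ∈ D ∧ x ≠ "" ∧ x ∉ E := by
    intro x
    rw [hN1, pv_newOf_mem, PySem.List.mem_sorted]
    constructor
    · rintro ⟨hD, hx, hn⟩
      exact ⟨hD, hx, fun hE => hn ((hmem0 x).mpr ⟨hE, hx⟩)⟩
    · rintro ⟨hD, hx, hE⟩
      exact ⟨hD, hx, fun hn => hE ((hmem0 x).mp hn).1⟩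
  have hmem2 : ∀ x : String, x ∈ N2 ↔ (x ∈ U ∧ pvIsPackaging x = false) ∧ x ≠ "" ∧ x ∉ E ∧ x ∉ D := by
    intro x
    rw [hN2, pv_newOf_mem, PySem.List.mem_sorted, PySem.Set.mem_ofList, List.mem_filter]
    rw [List.mem_append]
    constructor
    · rintro ⟨⟨hU, hp⟩, hx, hn⟩
      push_neg at hn
      have hE : x ∉ E := fun hE => hn.1 ((hmem0 x).mpr ⟨hE, hx⟩)
      exact ⟨⟨hU, by simpa using hp⟩, hx, hE, fun hD => hn.2 ((hmem1 x).mpr ⟨hD, hx, hE⟩)⟩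
    · rintro ⟨⟨hU, hp⟩, hx, hE, hD⟩
      refine ⟨⟨hU, by simp [hp]⟩, hx, ?_⟩
      push_neg
      exact ⟨fun h => hE ((hmem0 x).mp h).1, fun h => hD ((hmem1 x).mp h).1⟩
  have hmem3 : ∀ x : String, x ∈ N3 ↔ (x ∈ W ∧ pvIsPackaging x = false) ∧ x ≠ "" ∧ x ∉ E ∧ x ∉ D ∧ ¬(x ∈ U ∧ pvIsPackaging x = false) := by
    intro x
    rw [hN3, pv_newOf_mem, PySem.List.mem_sorted, PySem.Set.mem_ofList, List.mem_filter]
    rw [List.mem_append, List.mem_append]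
    constructor
    · rintro ⟨⟨hW, hp⟩, hx, hn⟩
      push_neg at hn
      have hE : x ∉ E := fun hE => hn.1 ((hmem0 x).mpr ⟨hE, hx⟩)
      have hD : x ∉ D := fun hD => hn.2.1 ((hmem1 x).mpr ⟨hD, hx, hE⟩)
      exact ⟨⟨hW, by simpa using hp⟩, hx, hE, hD,
        fun hU => hn.2.2 ((hmem2 x).mpr ⟨hU, hx, hE, hD⟩)⟩
    · rintro ⟨⟨hW, hp⟩, hx, hE, hD, hU⟩
      refine ⟨⟨hW, by simp [hp]⟩, hx, ?_⟩
      push_neg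
      exact ⟨fun h => hE ((hmem0 x).mp h).1, fun h => hD ((hmem1 x).mp h).1,
        fun h => hU ((hmem2 x).mp h).1⟩
  have hmem4 : ∀ x : String, x ∈ N4 ↔ (pvIsPackaging x = true ∧ (x ∈ C ∨ x ∈ U ∨ x ∈ W)) ∧ x ≠ "" ∧ x ∉ E ∧ x ∉ D ∧ ¬(x ∈ U ∧ pvIsPackaging x = false) ∧ ¬(x ∈ W ∧ pvIsPackaging x = false) := by
    intro x
    rw [hN4, pv_newOf_mem, PySem.List.mem_sorted, PySem.Set.mem_union, PySem.Set.mem_union,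
      PySem.Set.mem_union, PySem.Set.mem_ofList, PySem.Set.mem_ofList, PySem.Set.mem_ofList,
      List.mem_filter, List.mem_filter, List.mem_filter]
    rw [List.mem_append, List.mem_append, List.mem_append]
    constructor
    · rintro ⟨hin, hx, hn⟩
      push_neg at hn
      have hE : x ∉ E := fun hE => hn.1 ((hmem0 x).mpr ⟨hE, hx⟩)
      have hD : x ∉ D := fun hD => hn.2.1 ((hmem1 x).mpr ⟨hD, hx, hE⟩)
      have hU : ¬(x ∈ U ∧ pvIsPackaging x = false) :=
        fun hU => hn.2.2.1 ((hmem2 x).mpr ⟨hU, hx, hE, hD⟩)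
      have hW : ¬(x ∈ W ∧ pvIsPackaging x = false) :=
        fun hW => hn.2.2.2 ((hmem3 x).mpr ⟨hW, hx, hE, hD, hU⟩)
      have hp : pvIsPackaging x = true ∧ (x ∈ C ∨ x ∈ U ∨ x ∈ W) := by
        rcases hin with ((hnil | ⟨hCm, hPm⟩) | ⟨hUm, hPm⟩) | ⟨hWm, hPm⟩
        · simp at hnil
        · exact ⟨hPm, Or.inl hCm⟩
        · exact ⟨hPm, Or.inr (Or.inl hUm)⟩
        · exact ⟨hPm, Or.inr (Or.inr hWm)⟩
      exact ⟨hp, hx, hE, hD, hU, hW⟩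
    · rintro ⟨⟨hp, hin⟩, hx, hE, hD, hU, hW⟩
      refine ⟨?_, hx, ?_⟩
      · rcases hin with hC | hUm | hWm
        · left; left; right; exact ⟨hC, hp⟩
        · left; right; exact ⟨hUm, hp⟩
        · right; exact ⟨hWm, hp⟩
      · push_neg
        refine ⟨fun h => hE ((hmem0 x).mp h).1, fun h => hD ((hmem1 x).mp h).1,
          fun h => hU ((hmem2 x).mp h).1, fun h => hW ((hmem3 x).mp h).1⟩
  -- the blocks are strictly sorted
  have hpw0 : N0.Pairwise (· < ·) := pv_newOf_pairwise_lt _ _ (PySem.List.sorted_pairwise _ _)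
  have hpw1 : N1.Pairwise (· < ·) := pv_newOf_pairwise_lt _ _ (PySem.List.sorted_pairwise _ _)
  have hpw2 : N2.Pairwise (· < ·) := pv_newOf_pairwise_lt _ _ (PySem.List.sorted_pairwise _ _)
  have hpw3 : N3.Pairwise (· < ·) := pv_newOf_pairwise_lt _ _ (PySem.List.sorted_pairwise _ _)
  have hpw4 : N4.Pairwise (· < ·) := pv_newOf_pairwise_lt _ _ (PySem.List.sorted_pairwise _ _)
  -- the tagged concatenation, strictly increasing in (rank, path)
  set TA := N0.map (fun fp => (fp, (0 : Int))) ++ (N1.map (fun fp => (fp, (1 : Int))) ++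
    (N2.map (fun fp => (fp, (2 : Int))) ++ (N3.map (fun fp => (fp, (3 : Int))) ++
      N4.map (fun fp => (fp, (4 : Int)))))) with hTA
  have hsnd : ∀ (N : List String) (i : Int) (p : String × Int), p ∈ N.map (fun fp => (fp, i)) → p.2 = i := by
    intro N i p hp
    rcases List.mem_map.mp hp with ⟨x, _, rfl⟩
    rfl
  have hblock : ∀ (N : List String) (i : Int), N.Pairwise (· < ·) →
      (N.map (fun fp => (fp, i))).Pairwise (fun a b : String × Int => a.2 < b.2 ∨ (a.2 = b.2 ∧ a.1 < b.1)) := by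
    intro N i h
    rw [List.pairwise_map]
    exact h.imp (fun hab => Or.inr ⟨rfl, hab⟩)
  have hcross : ∀ (N M : List String) (i j : Int), i < j → ∀ a ∈ N.map (fun fp => (fp, i)),
      ∀ b ∈ M.map (fun fp => (fp, j)), ((a : String × Int).2 < b.2 ∨ (a.2 = b.2 ∧ a.1 < b.1)) := by
    intro N M i j hij a ha b hb
    exact Or.inl (by rw [hsnd _ _ _ ha, hsnd _ _ _ hb]; exact hij)
  have hTApw : TA.Pairwise (fun a b : String × Int => a.2 < b.2 ∨ (a.2 = b.2 ∧ a.1 < b.1)) := by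
    rw [hTA]
    refine List.pairwise_append.mpr ⟨hblock _ _ hpw0,
      List.pairwise_append.mpr ⟨hblock _ _ hpw1,
        List.pairwise_append.mpr ⟨hblock _ _ hpw2,
          List.pairwise_append.mpr ⟨hblock _ _ hpw3, hblock _ _ hpw4, hcross _ _ 3 4 (by norm_num)⟩, ?_⟩, ?_⟩, ?_⟩
    · intro a ha b hb
      rcases List.mem_append.mp hb with hb | hb
      · exact hcross _ _ 2 3 (by norm_num) a ha b hb
      · exact hcross _ _ 2 4 (by norm_num) a ha b hb
    · intro a ha b hb
      rcases List.mem_append.mp hb with hb | hb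
      · exact hcross _ _ 1 2 (by norm_num) a ha b hb
      · rcases List.mem_append.mp hb with hb | hb
        · exact hcross _ _ 1 3 (by norm_num) a ha b hb
        · exact hcross _ _ 1 4 (by norm_num) a ha b hb
    · intro a ha b hb
      rcases List.mem_append.mp hb with hb | hb
      · exact hcross _ _ 0 1 (by norm_num) a ha b hb
      · rcases List.mem_append.mp hb with hb | hb
        · exact hcross _ _ 0 2 (by norm_num) a ha b hb
        · rcases List.mem_append.mp hb with hb | hb
          · exact hcross _ _ 0 3 (by norm_num) a ha b hb
          · exact hcross _ _ 0 4 (by norm_num) a ha b hb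
  have hTAnodup : TA.Nodup :=
    hTApw.imp (fun {a b} hab => by
      rintro rfl
      rcases hab with h | ⟨_, h⟩ <;> exact lt_irrefl _ h)
  have hk : b5.keys.Nodup := by
    rw [hb5]
    exact pv_note_nodup _ (fun _ => (4 : Int)) _
      (pv_note_nodup _ (fun fp => if pvIsPackaging fp = true then 4 else 3) _
        (pv_note_nodup _ (fun fp => if pvIsPackaging fp = true then 4 else 2) _
          (pv_note_nodup _ (fun _ => (1 : Int)) _
            (pv_note_nodup _ (fun _ => (0 : Int)) _ PySem.Dict.nodup_keys_empty))))
  have hitems : b5.items.Nodup := by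
    have hk' := hk
    unfold PySem.Dict.keys at hk'
    exact List.Nodup.of_map _ hk'
  have hiff : ∀ p : String × Int, p ∈ TA ↔ p ∈ b5.items := by
    rintro ⟨fp, r⟩
    rw [← PySem.Dict.get?_eq_some_iff_mem_items _ _ _ hk, hb5, pv_get5, hTA]
    simp only [List.mem_append, List.mem_map, Prod.mk.injEq, hmem0, hmem1, hmem2, hmem3, hmem4]
    clear hTAnodup hTApw hcross hblock hsnd hpw0 hpw1 hpw2 hpw3 hpw4
      hmem0 hmem1 hmem2 hmem3 hmem4 hk hitems
    clear_value N0 N1 N2 N3 N4 b5 TA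
    clear hN0 hN1 hN2 hN3 hN4 hb5 hTA N0 N1 N2 N3 N4 b5 TA
    split_ifs with h1 h2 h3 h4 h5
    · simp_all
    · simp_all
    · simp_all
    · simp_all
    · simp_all
    · rw [iff_false]
      push_neg at h1 h2 h3 h4 h5
      rintro (⟨a, ⟨haE, hne⟩, rfl, hr⟩ | ⟨a, ⟨haD, hne, _⟩, rfl, hr⟩ | ⟨a, ⟨⟨haU, hpf⟩, hne, _⟩, rfl, hr⟩ | ⟨a, ⟨⟨haW, hpf⟩, hne, _⟩, rfl, hr⟩ | ⟨a, ⟨⟨hpt, hin⟩, hne, _⟩, rfl, hr⟩)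
      · exact absurd haE (h1 hne)
      · exact absurd haD (h2 hne)
      · exact absurd hpf (h3 hne haU)
      · exact absurd hpf (h4 hne haW)
      · exact absurd hpt (h5 hne hin)
  have hperm : TA.Perm b5.items := (List.perm_ext_iff_of_nodup hTAnodup hitems).mpr hiff
  have hkey : PySem.List.sorted2 b5.items (fun kv => kv.2) (fun kv => kv.1) false = TA :=
    pv_sorted2_eq _ _ _ _ hperm hTApw
  rw [hkey, hTA]
  simp only [List.map_append, List.map_map]
  rfl

-- ===== VERDICT (by name: the statement is the Claim_ definition above) =====
theorem order_files_from_zones_spec : Claim_equal_order_files_from_zones := by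
  intro zones _
  unfold Spec_order_files_from_zones order_files_from_zones order_files_from_zones_alt
  exact pv_core (PySem.Dict.getD (PySem.Dict.mk zones) "entrypoints" [])
    (PySem.Dict.getD (PySem.Dict.mk zones) "defs" [])
    (PySem.Dict.getD (PySem.Dict.mk zones) "upstream" [])
    (PySem.Dict.getD (PySem.Dict.mk zones) "downstream" [])
    (PySem.Dict.getD (PySem.Dict.mk zones) "closure" [])
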